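-- pv_equiv track=rewrite | github.com/christianebacani/Roadmap | Coding Challenges using Python and SQL/Code Wars Python Solved Problems/6 Kyu/validate_credit_card_number.py | double_elements
-- ===== SOURCE A (Python) =====
-- def double_elements(arr: list[str]) -> list[str]:
--     arr = arr[::-1]
--     result = []
--
--     for i in range(len(arr)):
--         if i % 2 != 0:
--             result.append(str(int(arr[i]) * 2))
--
--         else:
--             result.append(arr[i])
--
--     result = result[::-1]
--     return result
-- ===== SOURCE B (Python) =====
-- def double_elements(arr: list[str]) -> list[str]:
--     start = len(arr) % 2
--     return [str(int(x) * 2) if i % 2 == start else x for i, x in enumerate(arr)]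
-- ===== Notes on version B (the rewrite author's own statement) =====
-- stated objective: idiomatic
-- what changed: B drops both list reversals and the reversed-index loop: it computes once from the length's parity which forward positions are odd-from-the-end and doubles exactly those in a single enumerate pass.
import Mathlib
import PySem

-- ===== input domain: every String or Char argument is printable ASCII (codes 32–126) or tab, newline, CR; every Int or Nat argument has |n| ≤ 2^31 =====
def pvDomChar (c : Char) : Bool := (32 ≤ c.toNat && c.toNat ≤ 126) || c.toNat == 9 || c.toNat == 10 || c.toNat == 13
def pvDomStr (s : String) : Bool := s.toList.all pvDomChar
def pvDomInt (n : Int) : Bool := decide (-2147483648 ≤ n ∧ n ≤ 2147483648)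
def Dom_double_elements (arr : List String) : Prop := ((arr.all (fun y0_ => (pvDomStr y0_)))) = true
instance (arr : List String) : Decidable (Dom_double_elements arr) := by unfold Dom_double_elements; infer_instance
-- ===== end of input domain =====

-- B replaces A's reverse/branch/reverse loop by one forward enumerate pass that doubles
-- exactly the positions selected by the length's parity (idiomatic; same return value).

-- str(int(x) * 2), shared one-liner of both programs
def pvDbl (x : String) : String := PySem.Int.toStr ((PySem.Int.ofStr? x).getD 0 * 2)

-- ===== PORT A =====
def double_elements (arr : List String) : List String :=
  let arr := arr.reverse  -- arr[::-1]  (exact: PySem.List.slice?_none_none_neg_one)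
  let result :=
    (PySem.List.pyRange 0 (PySem.List.len arr) 1).foldl
      (fun result i =>
        if PySem.Int.mod i 2 ≠ 0 then
          result ++ [pvDbl (PySem.List.pyGetD arr i "")]
        else
          result ++ [PySem.List.pyGetD arr i ""]) []
  result.reverse  -- result[::-1]

-- ===== PORT B =====
def double_elements_alt (arr : List String) : List String :=
  let start := PySem.Int.mod (PySem.List.len arr) 2
  (PySem.List.enumerate arr).map
    (fun p => if PySem.Int.mod p.1 2 = start then pvDbl p.2 else p.2)

-- ===== PRECONDITION & SPEC =====
-- Pre_ excludes exactly the inputs where Python A raises ValueError: a non-int-parsable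
-- string sitting at an odd position counted from the end (the positions that get doubled).
def Pre_double_elements (arr : List String) : Prop :=
  ∀ i, i < arr.length → i % 2 = arr.length % 2 →
    (PySem.Int.ofStr? (arr.getD i "")).isSome = true

instance (arr : List String) : Decidable (Pre_double_elements arr) := by
  unfold Pre_double_elements; infer_instance

def pvWitness_double_elements : List String := ["7", "x"]

def Spec_double_elements (arr : List String) (out : List String) : Prop := out = double_elements_alt arr
instance (arr : List String) (out : List String) : Decidable (Spec_double_elements arr out) := by unfold Spec_double_elements; infer_instance

-- ===== CLAIM (what is proved, stated in full; the proofs are below) =====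
def Claim_equal_double_elements : Prop := ∀ (arr : List String), Dom_double_elements arr → Pre_double_elements arr → Spec_double_elements arr (double_elements arr)

-- ===== LEMMAS AND PROOFS =====

-- A's loop, written as a map over the reversed list's indices
theorem double_elements_eq_map (arr : List String) :
    double_elements arr =
      ((List.range arr.length).map
        (fun k : Nat => if ((k : Int)) % 2 ≠ 0 then pvDbl (arr.reverse.getD k "")
                  else arr.reverse.getD k "")).reverse := by
  unfold double_elements
  dsimp only
  have hbody :
      (PySem.List.pyRange 0 (PySem.List.len arr.reverse) 1).foldl
        (fun result i =>
          if PySem.Int.mod i 2 ≠ 0 then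
            result ++ [pvDbl (PySem.List.pyGetD arr.reverse i "")]
          else
            result ++ [PySem.List.pyGetD arr.reverse i ""]) [] =
      (PySem.List.pyRange 0 (PySem.List.len arr.reverse) 1).map
        (fun i => if PySem.Int.mod i 2 ≠ 0 then pvDbl (PySem.List.pyGetD arr.reverse i "")
                  else PySem.List.pyGetD arr.reverse i "") := by
    have hfun :
        (fun (result : List String) i =>
          if PySem.Int.mod i 2 ≠ 0 then
            result ++ [pvDbl (PySem.List.pyGetD arr.reverse i "")]
          else
            result ++ [PySem.List.pyGetD arr.reverse i ""]) =
        (fun result i => result ++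
          [if PySem.Int.mod i 2 ≠ 0 then pvDbl (PySem.List.pyGetD arr.reverse i "")
           else PySem.List.pyGetD arr.reverse i ""]) := by
      funext r i; split <;> rfl
    rw [hfun, PySem.List.foldl_append_singleton_eq_map, List.nil_append]
  rw [hbody, PySem.List.pyRange_one]
  simp [PySem.List.len_eq, List.map_map, Function.comp_def]

theorem double_elements_spec_aux (arr : List String) :
    double_elements arr = double_elements_alt arr := by
  rw [double_elements_eq_map]
  unfold double_elements_alt
  dsimp only
  rw [PySem.List.enumerate_eq_map_pyRange arr ""]
  rw [PySem.List.pyRange_one]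
  apply List.ext_getElem
  · simp [PySem.List.len_eq]
  intro j h1 h2
  simp only [List.length_reverse, List.length_map, List.length_range] at h1
  rw [List.getElem_reverse]
  simp only [List.getElem_map, List.getElem_range, PySem.List.len_eq]
  have hj : j < arr.length := by simpa using h1
  have hk : arr.length - 1 - j < arr.length := by omega
  -- index arithmetic on both sides
  rw [List.getD_eq_getElem _ _ (by simpa using hk)]
  rw [List.getElem_reverse]
  have hsub : arr.length - 1 - (arr.length - 1 - j) = j := by omega
  simp only [List.length_map, List.length_range, hsub]
  have hidx : PySem.List.pyGetD arr ((0 : Int) + (j : Int)) "" = arr[j] := by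
    rw [zero_add, PySem.List.pyGetD_natCast, List.getD_eq_getElem _ _ hj]
  rw [hidx]
  have hmod : PySem.Int.mod ((0 : Int) + (j : Int)) 2 = ((j % 2 : Nat) : Int) := by
    rw [zero_add]; exact_mod_cast PySem.Int.mod_natCast j 2
  rw [hmod]
  have hlenmod : PySem.Int.mod ((arr.length : Nat) : Int) 2 = ((arr.length % 2 : Nat) : Int) :=
    PySem.Int.mod_natCast arr.length 2
  rw [hlenmod]
  have hcond : (((arr.length - 1 - j : Nat) : Int) % 2 ≠ 0) ↔ ((j % 2 : Nat) : Int) = ((arr.length % 2 : Nat) : Int) := by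
    constructor <;> intro h
    · have : (arr.length - 1 - j) % 2 = 1 := by omega
      have : j % 2 = arr.length % 2 := by omega
      exact_mod_cast this
    · have hje : j % 2 = arr.length % 2 := by exact_mod_cast h
      have : (arr.length - 1 - j) % 2 = 1 := by omega
      omega
  by_cases hc : ((j % 2 : Nat) : Int) = ((arr.length % 2 : Nat) : Int)
  · rw [if_pos (hcond.mpr hc), if_pos hc]
  · rw [if_neg (fun h => hc (hcond.mp h)), if_neg hc]

-- ===== VERDICT (by name: the statement is the Claim_ definition above) =====
theorem double_elements_spec : Claim_equal_double_elements := by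
  intro arr _ _
  unfold Spec_double_elements
  exact double_elements_spec_aux arr
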